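-- pv_equiv track=rewrite | github.com/jnorth/cybergoose | app/lib/Worker.py | split_filesize
-- ===== SOURCE A (Python) =====
-- from math import ceil
--
-- def split_filesize(filesize, parts=1, min_part_size=52428800):
--   """
--     Partition a length of bytes into N number of ranges.
--   """
--   ranges = []
--   if (filesize < 1): return ranges
--
--   index = 0
--   offset = 0
--   range_size = max(min_part_size, int(ceil(filesize / parts)))
--
--   while True:
--     if offset >= filesize: break
--     length = min(range_size, filesize - offset)
--     ranges.append({
--       "offset": offset,
--       "length": length,
--       "index": index
--     })
--     index += 1
--     offset += length
--
--   for r in ranges: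
--     r["total"] = len(ranges)
--
--   return ranges
-- ===== SOURCE B (Python) =====
-- from math import ceil
--
-- def split_filesize(filesize, parts=1, min_part_size=52428800):
--   """
--     Partition a length of bytes into N number of ranges.
--   """
--   if filesize < 1:
--     return []
--   range_size = max(min_part_size, int(ceil(filesize / parts)))
--   # Walk backwards from the end of the file, snapping each chunk boundary
--   # down to the previous multiple of range_size; the first (last) chunk
--   # absorbs the remainder, every earlier chunk is exactly range_size long.
--   pieces = []
--   end = filesize
--   while end > 0:
--     start = (end - 1) // range_size * range_size
--     pieces.append((start, end - start))
--     end = start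
--   pieces.reverse()
--   return [{"offset": o, "length": l, "index": i, "total": len(pieces)}
--           for i, (o, l) in enumerate(pieces)]
-- ===== Notes on version B (the rewrite author's own statement) =====
-- stated objective: alternative
-- what changed: Instead of A's forward while-loop accumulating offsets with min() plus a second pass stamping total into each dict, B builds the range list back-to-front: it walks from the end of the file snapping each boundary down to the previous multiple of range_size with floor division (so the last chunk absorbs the remainder and no min() is needed), reverses, and emits complete records in one enumerate pass with total known up front.
import Mathlib
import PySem

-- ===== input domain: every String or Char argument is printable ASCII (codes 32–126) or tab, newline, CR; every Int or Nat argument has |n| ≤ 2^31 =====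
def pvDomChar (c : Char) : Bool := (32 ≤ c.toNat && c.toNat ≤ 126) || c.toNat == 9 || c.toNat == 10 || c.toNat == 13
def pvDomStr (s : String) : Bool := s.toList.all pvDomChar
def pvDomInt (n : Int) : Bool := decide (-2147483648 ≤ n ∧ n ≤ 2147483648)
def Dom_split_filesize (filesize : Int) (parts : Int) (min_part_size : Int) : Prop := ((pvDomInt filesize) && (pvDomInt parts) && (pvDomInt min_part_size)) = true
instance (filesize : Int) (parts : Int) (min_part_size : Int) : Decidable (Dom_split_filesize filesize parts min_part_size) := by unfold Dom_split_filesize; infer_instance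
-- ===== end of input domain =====

-- B replaces A's forward while-loop (offset accumulation with min, then a second
-- pass stamping "total") by a back-to-front walk that snaps each boundary down to
-- the previous multiple of range_size with floor division, then reverses and emits
-- complete records in a single enumerate pass (objective: alternative).

-- ===== PORT A =====
-- the `while True:` loop; fuel only makes the recursion total (Python's loop diverges
-- when range_size ≤ 0 and 1 ≤ filesize; Pre_ excludes that region)
def splitLoopA (filesize range_size : Int) (index offset : Int) : Nat → List (List (String × Int))
  | 0 => []
  | fuel + 1 =>
    if offset ≥ filesize then []
    else
      let length := min range_size (filesize - offset)
      [("offset", offset), ("length", length), ("index", index)]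
        :: splitLoopA filesize range_size (index + 1) (offset + length) fuel

def split_filesize (filesize : Int) (parts : Int) (min_part_size : Int) : List (List (String × Int)) :=
  if filesize < 1 then []
  else
    -- int(ceil(filesize / parts)) == -((-filesize) // parts) exactly on |n| ≤ 2^31
    let range_size := max min_part_size (-(PySem.Int.floordiv (-filesize) parts))
    let ranges := splitLoopA filesize range_size 0 0 (filesize.toNat + 1)
    ranges.map (fun r => r ++ [("total", (ranges.length : Int))])

-- ===== PORT B =====
-- Source B's `while end > 0:` loop; fuel only makes the recursion total (the loop
-- diverges when range_size ≤ 0 and 1 ≤ filesize; Pre_ excludes that region)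
def splitLoopB (range_size : Int) (pieces : List (Int × Int)) (e : Int) : Nat → List (Int × Int)
  | 0 => pieces
  | fuel + 1 =>
    if e > 0 then
      let s := PySem.Int.floordiv (e - 1) range_size * range_size
      splitLoopB range_size (pieces ++ [(s, e - s)]) s fuel
    else pieces

def split_filesize_alt (filesize : Int) (parts : Int) (min_part_size : Int) : List (List (String × Int)) :=
  if filesize < 1 then []
  else
    let range_size := max min_part_size (-(PySem.Int.floordiv (-filesize) parts))
    let pieces := (splitLoopB range_size [] filesize (filesize.toNat + 1)).reverse
    (PySem.List.enumerate pieces 0).map (fun il =>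
      [("offset", il.2.1), ("length", il.2.2), ("index", il.1),
       ("total", (pieces.length : Int))])

-- ===== PRECONDITION & SPEC =====
-- Pre_ excludes, among the inputs with 1 ≤ filesize, parts = 0 (A raises
-- ZeroDivisionError) and range_size < 1 (possible only with parts < 0 and
-- min_part_size < 1; A's while-loop never advances and diverges).
def Pre_split_filesize (filesize : Int) (parts : Int) (min_part_size : Int) : Prop :=
  filesize < 1 ∨
    (parts ≠ 0 ∧ 1 ≤ max min_part_size (-(PySem.Int.floordiv (-filesize) parts)))
instance (filesize : Int) (parts : Int) (min_part_size : Int) : Decidable (Pre_split_filesize filesize parts min_part_size) := by unfold Pre_split_filesize; infer_instance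

def pvWitness_split_filesize : Int × Int × Int := (100, 3, 10)

def Spec_split_filesize (filesize : Int) (parts : Int) (min_part_size : Int) (out : List (List (String × Int))) : Prop := out = split_filesize_alt filesize parts min_part_size
instance (filesize : Int) (parts : Int) (min_part_size : Int) (out : List (List (String × Int))) : Decidable (Spec_split_filesize filesize parts min_part_size out) := by unfold Spec_split_filesize; infer_instance

-- ===== CLAIM (what is proved, stated in full; the proofs are below) =====
def Claim_equal_split_filesize : Prop := ∀ (filesize : Int) (parts : Int) (min_part_size : Int), Dom_split_filesize filesize parts min_part_size → Pre_split_filesize filesize parts min_part_size → Spec_split_filesize filesize parts min_part_size (split_filesize filesize parts min_part_size)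

-- ===== LEMMAS AND PROOFS =====

-- A's loop, started at offset k*rs, yields exactly the remaining c - k ranges
-- of the closed form (offset i*rs, length min rs (f - i*rs), index i).
lemma splitLoopA_eq (f rs : Int) (hrs : 1 ≤ rs) (c : Int)
    (hc1 : (c - 1) * rs < f) (hc2 : f ≤ c * rs) :
    ∀ (n fuel : Nat) (k : Int), 0 ≤ k → c - k = n → n ≤ fuel →
      splitLoopA f rs k (k * rs) fuel =
        (List.range n).map (fun (j : Nat) =>
          [("offset", (k + (j : Int)) * rs),
           ("length", min rs (f - (k + (j : Int)) * rs)),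
           ("index", k + (j : Int))]) := by
  intro n
  induction n with
  | zero =>
    intro fuel k hk hck _
    have hck' : c = k := by omega
    have hoff : k * rs ≥ f := by
      calc f ≤ c * rs := hc2
        _ = k * rs := by rw [hck']
    cases fuel with
    | zero => simp [splitLoopA]
    | succ fuel => simp [splitLoopA, hoff]
  | succ n ih =>
    intro fuel k hk hck hfuel
    have hklt : k ≤ c - 1 := by omega
    have hofflt : k * rs < f :=
      lt_of_le_of_lt (mul_le_mul_of_nonneg_right hklt (by omega)) hc1
    obtain ⟨fuel', rfl⟩ : ∃ fuel', fuel = fuel' + 1 := ⟨fuel - 1, by omega⟩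
    rw [List.range_succ_eq_map]
    by_cases hbig : rs ≤ f - k * rs
    · -- full-size range, recurse at offset (k+1)*rs
      have hmin : min rs (f - k * rs) = rs := min_eq_left hbig
      have hrec := ih fuel' (k + 1) (by omega) (by omega) (by omega)
      simp only [splitLoopA, not_le.mpr hofflt]
      rw [hmin]
      have hoff' : k * rs + rs = (k + 1) * rs := by ring
      rw [hoff', hrec, List.map_cons, List.map_map]
      simp only [if_false]
      refine congrArg₂ List.cons ?_ ?_
      · simp [hmin]
      · apply List.map_congr_left
        intro j _
        simp only [Function.comp_apply, Nat.succ_eq_add_one]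
        push_cast
        ring_nf
    · -- last, short range ends at offset f; the remaining count is 0
      push_neg at hbig
      have hmin : min rs (f - k * rs) = f - k * rs := min_eq_right (le_of_lt hbig)
      have hcend : c ≤ k + 1 := by
        by_contra hcon
        push_neg at hcon
        have h1 : (k + 1) ≤ c - 1 := by omega
        have := mul_le_mul_of_nonneg_right h1 (show (0:Int) ≤ rs by omega)
        nlinarith
      have hn0 : n = 0 := by omega
      subst hn0
      simp only [splitLoopA, if_neg (not_le.mpr hofflt)]
      rw [hmin]
      have hoff' : k * rs + (f - k * rs) = f := by ring
      rw [hoff']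
      have htail : ∀ fu, splitLoopA f rs (k + 1) f fu = [] := by
        intro fu; cases fu <;> simp [splitLoopA]
      rw [htail]
      simp [hmin]

-- B's backward loop started at a multiple k*rs appends the k full-size pieces
-- ((k-1)*rs, rs), ((k-2)*rs, rs), …, (0, rs).
lemma splitLoopB_mult (rs : Int) (hrs : 1 ≤ rs) :
    ∀ (k : Nat) (fuel : Nat) (acc : List (Int × Int)), k ≤ fuel →
      splitLoopB rs acc ((k : Int) * rs) fuel =
        acc ++ (List.range k).map (fun (j : Nat) => (((k : Int) - 1 - j) * rs, rs)) := by
  intro k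
  induction k with
  | zero =>
    intro fuel acc _
    cases fuel <;> simp [splitLoopB]
  | succ k ih =>
    intro fuel acc hfuel
    obtain ⟨fuel', rfl⟩ : ∃ fuel', fuel = fuel' + 1 := ⟨fuel - 1, by omega⟩
    have hpos : ((k : Int) + 1) * rs > 0 := by positivity
    have hfd : PySem.Int.floordiv (((k : Int) + 1) * rs - 1) rs = k := by
      rw [PySem.Int.floordiv_eq_iff_of_pos (by omega)]
      constructor <;> nlinarith
    simp only [splitLoopB]
    push_cast
    rw [if_pos hpos, hfd]
    have hlen : ((k : Int) + 1) * rs - (k : Int) * rs = rs := by ring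
    rw [hlen, ih fuel' (acc ++ [((k : Int) * rs, rs)]) (by omega)]
    rw [List.range_succ_eq_map, List.map_cons, List.map_map]
    simp only [Nat.cast_zero, List.append_assoc, List.singleton_append]
    refine congrArg (acc ++ ·) (congrArg₂ List.cons (by ring_nf) ?_)
    apply List.map_congr_left
    intro j _
    simp only [Function.comp_apply, Prod.mk.injEq]
    push_cast
    exact ⟨by ring, trivial⟩

-- reversing the back-to-front list of full pieces gives them in offset order
lemma rev_map_range (K : Nat) (rs : Int) :
    ((List.range K).map (fun (j : Nat) => (((K : Int) - 1 - j) * rs, rs))).reverse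
      = (List.range K).map (fun (i : Nat) => ((i : Int) * rs, rs)) := by
  apply List.ext_getElem
  · simp
  · intro i h1 h2
    simp only [List.length_reverse, List.length_map, List.length_range] at h1
    rw [List.getElem_reverse]
    simp only [List.getElem_map, List.getElem_range, List.length_map, List.length_range]
    congr 2
    have : ((K - 1 - i : Nat) : Int) = (K : Int) - 1 - i := by omega
    rw [this]; ring

-- enumerate of a map over range is a map over range
lemma enumerate_map_range {α : Type} (n : Nat) (g : Nat → α) :
    PySem.List.enumerate ((List.range n).map g) 0
      = (List.range n).map (fun (i : Nat) => ((i : Int), g i)) := by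
  apply List.ext_getElem
  · simp [PySem.List.length_enumerate]
  · intro i h1 h2
    simp only [PySem.List.length_enumerate, List.length_map, List.length_range] at h1
    rw [PySem.List.getElem_enumerate]
    simp

theorem split_filesize_spec : Claim_equal_split_filesize := by
  intro f p m _ hpre
  unfold Spec_split_filesize split_filesize split_filesize_alt
  by_cases hf : f < 1
  · simp [hf]
  · push_neg at hf
    obtain ⟨hp, hrs'⟩ : p ≠ 0 ∧ 1 ≤ max m (-(PySem.Int.floordiv (-f) p)) := by
      rcases hpre with h | h
      · omega
      · exact h
    simp only [if_neg (not_lt.mpr hf)]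
    set rs := max m (-(PySem.Int.floordiv (-f) p)) with hrs_def
    have hrs : 1 ≤ rs := hrs'
    set c := -(PySem.Int.floordiv (-f) rs) with hc_def
    have hc : (c - 1) * rs < f ∧ f ≤ c * rs :=
      (PySem.Int.neg_floordiv_neg_eq_iff_of_pos (a := f) (b := rs) (q := c)
        (by omega)).mp rfl
    have hc1 : 1 ≤ c := by
      by_contra hcon
      push_neg at hcon
      have : c * rs ≤ 0 := mul_nonpos_of_nonpos_of_nonneg (by omega) (by omega)
      omega
    have hcle : c ≤ f := by
      have h1 : c - 1 ≤ (c - 1) * rs := le_mul_of_one_le_right (by omega) hrs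
      omega
    -- K = c - 1 as a Nat
    set K : Nat := (c - 1).toNat with hK_def
    have hKc : ((K : Int)) = c - 1 := by omega
    -- B's loop: one unfolding, then the multiples lemma
    have hfd1 : PySem.Int.floordiv (f - 1) rs = c - 1 := by
      rw [PySem.Int.floordiv_eq_iff_of_pos (by omega)]
      have hcr : (c - 1 + 1) * rs = c * rs := by ring
      exact ⟨by omega, by omega⟩
    have hloopB : splitLoopB rs [] f (f.toNat + 1)
        = ((c - 1) * rs, f - (c - 1) * rs)
            :: (List.range K).map (fun (j : Nat) => (((K : Int) - 1 - j) * rs, rs)) := by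
      have hfpos : f > 0 := by omega
      simp only [splitLoopB, if_pos hfpos, hfd1]
      have hcK : (c - 1) * rs = ((K : Int)) * rs := by rw [hKc]
      rw [hcK, splitLoopB_mult rs hrs K f.toNat
        ([] ++ [(((K : Int)) * rs, f - ((K : Int)) * rs)]) (by omega)]
      simp [hKc]
    -- pieces reversed = closed form over range c.toNat
    have hcnat : c.toNat = K + 1 := by omega
    have hpieces : (splitLoopB rs [] f (f.toNat + 1)).reverse
        = (List.range c.toNat).map (fun (i : Nat) =>
            ((i : Int) * rs, min rs (f - (i : Int) * rs))) := by
      rw [hloopB, List.reverse_cons, rev_map_range, hcnat, List.range_succ,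
        List.map_append]
      congr 1
      · apply List.map_congr_left
        intro i hi
        have hi' : (i : Int) ≤ (K : Int) - 1 := by
          simp only [List.mem_range] at hi; omega
        have : rs ≤ f - (i : Int) * rs := by nlinarith
        simp [min_eq_left this]
      · have hcr : c * rs = (c - 1) * rs + rs := by ring
        have hcK2 : ((K : Int)) * rs = (c - 1) * rs := by rw [hKc]
        have hle2 : f - (K : Int) * rs ≤ rs := by
          have h2 := hc.2; omega
        simp [hKc]
        omega
    rw [hpieces, enumerate_map_range]
    -- A's loop via the closed form
    have hloop := splitLoopA_eq f rs hrs c hc.1 hc.2 c.toNat (f.toNat + 1) 0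
      le_rfl (by omega) (by omega)
    rw [zero_mul] at hloop
    rw [hloop, List.length_map, List.length_range, List.map_map, List.map_map,
      List.length_map, List.length_range]
    apply List.map_congr_left
    intro j _
    simp only [Function.comp_apply, List.cons_append, List.nil_append]
    norm_num
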